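-- pv_equiv track=rewrite | github.com/martyn-smith/advent-of-code | 2020/aoc6.py | count_positives_2
-- ===== SOURCE A (Python) =====
-- def count_positives_2(group: list) -> int:
--     """
--     Groupwise response counting - for which all parties answered yes.
--     """
--     if len(group) <= 1:
--         return len(set(group[0]))
--     responses = set(group[0])
--     for g in group[1:]:
--         if responses is None:
--             return 0
--         responses.intersection_update(set(g))
--     return len(responses) if responses is not None else 0
-- ===== SOURCE B (Python) =====
-- def count_positives_2(group: list) -> int:
--     """
--     Groupwise response counting - for which all parties answered yes.
--     """
--     if len(group) <= 1:
--         return len(set(group[0]))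
--     counts = {}
--     for g in group:
--         for c in set(g):
--             counts[c] = counts.get(c, 0) + 1
--     return sum(1 for v in counts.values() if v == len(group))
-- ===== Notes on version B (the rewrite author's own statement) =====
-- stated objective: alternative
-- what changed: Replaces the progressive set-intersection loop with a single whole-group frequency table (dict counting, per member, each distinct character), selecting the characters whose count equals the group size.
import Mathlib
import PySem

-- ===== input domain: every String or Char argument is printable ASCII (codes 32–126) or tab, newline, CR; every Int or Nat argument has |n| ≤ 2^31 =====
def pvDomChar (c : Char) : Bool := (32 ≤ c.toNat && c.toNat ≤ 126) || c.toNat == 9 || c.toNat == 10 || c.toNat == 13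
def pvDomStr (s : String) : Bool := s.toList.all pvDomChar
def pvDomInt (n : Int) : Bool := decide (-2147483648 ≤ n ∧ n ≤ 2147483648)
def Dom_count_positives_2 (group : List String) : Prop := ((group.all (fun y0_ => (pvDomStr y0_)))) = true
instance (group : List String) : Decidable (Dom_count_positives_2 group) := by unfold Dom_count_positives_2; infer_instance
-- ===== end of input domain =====

-- B replaces A's progressive set-intersection loop with a whole-group frequency
-- table selected by threshold; same cost, different data structure ("alternative").

-- ===== PORT A =====
-- (A's `if responses is None: return 0` branches are dead code: `responses` is
--  always a set, never None; the port carries only the live path.)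
def count_positives_2 (group : List String) : Int :=
  match group with
  | [] => 0  -- Python: group[0] raises IndexError here; excluded by Pre_
  | g0 :: rest =>
    if group.length ≤ 1 then
      ((PySem.Set.ofList g0.toList).length : Int)
    else
      -- rest = group[1:] (PySem.List.slice_from)
      let responses := rest.foldl
        (fun r g => PySem.Set.inter r (PySem.Set.ofList g.toList))
        (PySem.Set.ofList g0.toList)
      (responses.length : Int)

-- ===== PORT B =====
def count_positives_2_alt (group : List String) : Int :=
  match group with
  | [] => 0  -- Python: group[0] raises IndexError here; excluded by Pre_
  | g0 :: _ =>
    if group.length ≤ 1 then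
      ((PySem.Set.ofList g0.toList).length : Int)
    else
      let counts : PySem.Dict Char Int := group.foldl
        (fun d g => (PySem.Set.ofList g.toList).foldl
          (fun d c => d.insert c (d.getD c 0 + 1)) d)
        PySem.Dict.empty
      (counts.values.map (fun v => if v = (group.length : Int) then (1 : Int) else 0)).sum

-- ===== PRECONDITION & SPEC =====
-- Python A raises IndexError on the empty list (group[0]); that is the only exclusion.
def Pre_count_positives_2 (group : List String) : Prop := group ≠ []
instance (group : List String) : Decidable (Pre_count_positives_2 group) := by unfold Pre_count_positives_2; infer_instance
def pvWitness_count_positives_2 : List String := ["ab", "bc"]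

def Spec_count_positives_2 (group : List String) (out : Int) : Prop := out = count_positives_2_alt group
instance (group : List String) (out : Int) : Decidable (Spec_count_positives_2 group out) := by unfold Spec_count_positives_2; infer_instance

-- ===== CLAIM (what is proved, stated in full; the proofs are below) =====
def Claim_equal_count_positives_2 : Prop := ∀ (group : List String), Dom_count_positives_2 group → Pre_count_positives_2 group → Spec_count_positives_2 group (count_positives_2 group)

-- ===== LEMMAS AND PROOFS =====

-- A's intersection fold is a filter of the first member's character set
theorem interFold (l : List String) (s : List Char) :
    l.foldl (fun r g => PySem.Set.inter r (PySem.Set.ofList g.toList)) s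
      = s.filter (fun c => l.all (fun g => decide (c ∈ g.toList))) := by
  induction l generalizing s with
  | nil => simp
  | cons g l ih =>
    rw [List.foldl_cons, ih]
    simp only [PySem.Set.inter, List.filter_filter, List.all_cons]
    congr 1
    funext c
    simp [PySem.Set.mem_ofList, Bool.and_comm]

-- B's counting loop, named for the proofs
def bigFold (l : List String) (d : PySem.Dict Char Int) : PySem.Dict Char Int :=
  l.foldl (fun d g => (PySem.Set.ofList g.toList).foldl
    (fun d c => d.insert c (d.getD c 0 + 1)) d) d

theorem getD_bigFold (l : List String) (d : PySem.Dict Char Int) (c : Char) :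
    (bigFold l d).getD c 0 = d.getD c 0 + (l.countP (fun g => decide (c ∈ g.toList)) : Int) := by
  induction l generalizing d with
  | nil => simp [bigFold]
  | cons g l ih =>
    rw [bigFold, List.foldl_cons, ← bigFold, ih,
        PySem.Dict.getD_foldl_insert_add_one,
        List.Nodup.count (PySem.Set.nodup_ofList g.toList)]
    simp [PySem.Set.mem_ofList, List.countP_cons]
    by_cases h : c ∈ g.toList <;> simp [h] <;> ring

theorem keys_nodup_bigFold (l : List String) (d : PySem.Dict Char Int) (h : d.keys.Nodup) :
    (bigFold l d).keys.Nodup := by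
  induction l generalizing d with
  | nil => simpa [bigFold]
  | cons g l ih =>
    rw [bigFold, List.foldl_cons, ← bigFold]
    exact ih _ (PySem.Dict.nodup_keys_foldl_insert _ _ _ h)

theorem mem_keys_bigFold (l : List String) (d : PySem.Dict Char Int) (c : Char) :
    c ∈ (bigFold l d).keys ↔ c ∈ d.keys ∨ ∃ g ∈ l, c ∈ g.toList := by
  induction l generalizing d with
  | nil => simp [bigFold]
  | cons g l ih =>
    rw [bigFold, List.foldl_cons, ← bigFold, ih,
        PySem.Dict.keys_foldl_insert]
    simp [PySem.Set.mem_update, PySem.Set.mem_ofList]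
    tauto

-- the two else-branches agree: a character survives every intersection iff its
-- whole-group tally reaches the group size
theorem main_branch (g0 : String) (rest : List String) :
    (((PySem.Set.ofList g0.toList).filter
        (fun c => rest.all (fun g => decide (c ∈ g.toList)))).length : Int)
    = ((bigFold (g0 :: rest) PySem.Dict.empty).values.map
        (fun v => if v = ((g0 :: rest).length : Int) then (1 : Int) else 0)).sum := by
  have hnd : (bigFold (g0 :: rest) PySem.Dict.empty).keys.Nodup :=
    keys_nodup_bigFold _ _ (by simp)
  rw [PySem.Dict.values_eq_map_keys _ hnd 0, List.map_map]
  have hc : ((fun v => if v = ((g0 :: rest).length : Int) then (1 : Int) else 0)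
        ∘ fun k => (bigFold (g0 :: rest) PySem.Dict.empty).getD k 0)
      = fun k => if ((bigFold (g0 :: rest) PySem.Dict.empty).getD k 0
            = ((g0 :: rest).length : Int) : Bool) = true then (1:Int) else 0 := by
    funext k; simp
  rw [hc, PySem.List.sum_map_ite_one_zero, List.countP_eq_length_filter]
  congr 1
  apply List.Perm.length_eq
  rw [List.perm_ext_iff_of_nodup (List.Nodup.filter _ (PySem.Set.nodup_ofList _))
      (List.Nodup.filter _ hnd)]
  intro c
  simp only [List.mem_filter, PySem.Set.mem_ofList, mem_keys_bigFold, getD_bigFold,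
    PySem.Dict.keys_empty, PySem.Dict.getD_empty, decide_eq_true_eq, List.all_eq_true,
    List.not_mem_nil, false_or, zero_add]
  constructor
  · rintro ⟨hc0, hall⟩
    have hcnt : (g0 :: rest).countP (fun g => decide (c ∈ g.toList)) = (g0 :: rest).length := by
      rw [List.countP_eq_length]; intro g hg
      rcases hg with _ | hg
      · simpa using hc0
      · simpa using hall _ (by assumption)
    exact ⟨⟨g0, by simp, hc0⟩, by simp [hcnt]⟩
  · rintro ⟨-, hcnt⟩
    have hall : ∀ g ∈ (g0 :: rest), decide (c ∈ g.toList) = true := by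
      rw [← List.countP_eq_length]
      exact_mod_cast hcnt
    exact ⟨by simpa using hall g0 (by simp),
      fun g hg => by simpa using hall g (by simp [hg])⟩

-- ===== VERDICT (by name: the statement is the Claim_ definition above) =====
theorem count_positives_2_spec : Claim_equal_count_positives_2 := by
  intro group _hdom hpre
  unfold Spec_count_positives_2
  match group with
  | [] => exact absurd rfl hpre
  | g0 :: rest =>
    by_cases hlen : (g0 :: rest).length ≤ 1
    · have hr : rest = [] := by
        cases rest with
        | nil => rfl
        | cons a t => simp at hlen
      subst hr
      simp [count_positives_2, count_positives_2_alt]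
    · simp only [count_positives_2, count_positives_2_alt, if_neg hlen]
      rw [interFold]
      exact main_branch g0 rest
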